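-- pv_equiv track=rewrite | github.com/arianesk2002/labs109 | labs109.py | eliminate_neighbours
-- ===== SOURCE A (Python) =====
-- def eliminate_neighbours(items):
--     n = len(items) #The length of the list
--     step = 0
--
--     #step count
--     for i in range(1, len(items) + 1):
--         if i in items:
--             step += 1
--
--             #if it's the last step
--             if len(items) == 1:
--                 items.pop(0)
--                 break
--
--             org = items.index(i) #find index
--             left = org - 1
--             right = org + 1
--
--             #find the larger element(value)
--             if left < 0 or (right < len(items) and items[right] > items[left]):
--                 left = right
--             value = items[left]
--
--             #remove two element
--             if org > left:
--                 org = left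
--             items.pop(org)
--             items.pop(org)
--
--             if value == n: # if value == max
--                 break
--
--     return step
-- ===== SOURCE B (Python) =====
-- # B: doubly linked list over the ORIGINAL positions (prev/nxt arrays) with a
-- # presence bitmap and a value -> sorted-positions index built once; each
-- # elimination round is O(1) amortised instead of A's repeated membership scan,
-- # index scan and list pops.  B does not mutate the caller's list (A empties it);
-- # the equivalence claimed is about the return value only.
--
-- def eliminate_neighbours(items):
--     n = len(items)
--     positions = {}                      # value -> its original indices, increasing
--     for j, v in enumerate(items):
--         positions.setdefault(v, []).append(j)
--     prev = list(range(-1, n - 1))       # doubly linked list over 0..n-1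
--     nxt = list(range(1, n + 1))         # n == "past the end"
--     alive = [True] * n
--     live = n
--     step = 0
--     for i in range(1, n + 1):
--         p = -1                          # first surviving occurrence of i
--         for j in positions.get(i, []):
--             if alive[j]:
--                 p = j
--                 break
--         if p < 0:
--             continue
--         step += 1
--         if live == 1:
--             break
--         l, r = prev[p], nxt[p]
--         q = r if l < 0 or (r < n and items[r] > items[l]) else l
--         value = items[q]
--         for x in (p, q):                # unlink p and its larger neighbour q
--             alive[x] = False
--             a, b = prev[x], nxt[x]
--             if a >= 0:
--                 nxt[a] = b
--             if b < n:
--                 prev[b] = a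
--         live -= 2
--         if value == n:
--             break
--     return step
-- ===== Notes on version B (the rewrite author's own statement) =====
-- stated objective: faster
-- what changed: B replaces A's per-round scans of the shrinking list (membership test, index search, two pops) with a doubly linked list over the original positions (prev/nxt arrays), a presence bitmap and a value-to-sorted-positions map built once, so each elimination unlinks two nodes in O(1) amortised and never rebuilds or scans the current list.
import Mathlib
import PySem

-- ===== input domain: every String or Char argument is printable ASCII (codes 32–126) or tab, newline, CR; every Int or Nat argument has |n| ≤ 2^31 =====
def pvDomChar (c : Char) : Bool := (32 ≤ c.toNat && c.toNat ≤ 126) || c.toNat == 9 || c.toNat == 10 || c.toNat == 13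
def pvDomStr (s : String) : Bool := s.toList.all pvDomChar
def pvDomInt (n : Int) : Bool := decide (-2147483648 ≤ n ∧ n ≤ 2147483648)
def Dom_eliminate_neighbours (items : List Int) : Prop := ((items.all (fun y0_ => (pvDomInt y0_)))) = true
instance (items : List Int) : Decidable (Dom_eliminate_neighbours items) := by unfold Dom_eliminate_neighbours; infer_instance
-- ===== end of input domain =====

-- B replaces A's per-round scans of the shrinking list (membership test, index scan, two pops)
-- by a doubly linked list over the original positions (prev/nxt arrays), a presence bitmap and a
-- value→positions map built once, unlinking the two eliminated elements in O(1); return values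
-- agree (A empties its argument in place, B never mutates it — the claim is about the return value only).

-- ===== PORT A =====
-- loop body of A, with state (items, step, done-flag); the `none` fallbacks of
-- pop?/index? are unreachable on the states the loop visits (proved below)
def pvAbody (n : Int) (s : List Int × Int × Bool) (i : Int) : List Int × Int × Bool :=
  match s with
  | (its, step, done) =>
    if done then (its, step, done)
    else if i ∈ its then
      let step' := step + 1
      if its.length = 1 then
        match PySem.List.pop? its 0 with
        | some (_, its') => (its', step', true)
        | none => (its, step', true)
      else
        match PySem.List.index? its i with
        | none => (its, step', done)
        | some org =>
          let left : Int := (org : Int) - 1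
          let right : Int := (org : Int) + 1
          let left' : Int :=
            if left < 0 ∨ (right < (its.length : Int) ∧ (PySem.List.pyGet? its right).getD 0 > (PySem.List.pyGet? its left).getD 0)
            then right else left
          let value : Int := (PySem.List.pyGet? its left').getD 0
          let org' : Int := if (org : Int) > left' then left' else (org : Int)
          match PySem.List.pop? its org' with
          | none => (its, step', true)
          | some (_, its1) =>
            match PySem.List.pop? its1 org' with
            | none => (its1, step', true)
            | some (_, its2) =>
              if value = n then (its2, step', true) else (its2, step', done)
    else (its, step, done)

def eliminate_neighbours (items : List Int) : Int :=
  let n : Int := (items.length : Int)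
  ((PySem.List.pyRange 1 (n + 1) 1).foldl (pvAbody n) (items, 0, false)).2.1

-- ===== PORT B =====
-- positions = {}; for j, v in enumerate(items): positions.setdefault(v, []).append(j)
def pvPositions (items : List Int) : PySem.Dict Int (List Int) :=
  (PySem.List.enumerate items 0).foldl
    (fun d p => d.modify p.2 [] (fun l => l ++ [p.1])) PySem.Dict.empty

-- inner for-loop: first j in ps with alive[j], else -1 (indices in ps are nonnegative and < len(alive))
def pvFirstAlive (ps : List Int) (alive : List Bool) : Int :=
  match ps with
  | [] => -1
  | j :: t => if (PySem.List.pyGet? alive j).getD false then j else pvFirstAlive t alive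

-- body of `for x in (p, q)`: x is a valid nonnegative index here, so pySetD is exact
def pvUnlink (n : Int) (s : List Int × List Int × List Bool) (x : Int) :
    List Int × List Int × List Bool :=
  match s with
  | (prev, nxt, alive) =>
    let alive' := PySem.List.pySetD alive x false
    let a := (PySem.List.pyGet? prev x).getD 0
    let b := (PySem.List.pyGet? nxt x).getD 0
    let nxt' := if a ≥ 0 then PySem.List.pySetD nxt a b else nxt
    let prev' := if b < n then PySem.List.pySetD prev b a else prev
    (prev', nxt', alive')

structure PvBSt where
  prev : List Int
  nxt : List Int
  alive : List Bool
  live : Int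
  step : Int
  done : Bool

def pvBbody (items : List Int) (n : Int) (pos : PySem.Dict Int (List Int))
    (st : PvBSt) (i : Int) : PvBSt :=
  if st.done then st
  else
    let p := pvFirstAlive (pos.getD i []) st.alive
    if p < 0 then st
    else
      let step' := st.step + 1
      if st.live = 1 then { st with step := step', done := true }
      else
        let l := (PySem.List.pyGet? st.prev p).getD 0
        let r := (PySem.List.pyGet? st.nxt p).getD 0
        let q := if l < 0 ∨ (r < n ∧ (PySem.List.pyGet? items r).getD 0 > (PySem.List.pyGet? items l).getD 0) then r else l
        let value := (PySem.List.pyGet? items q).getD 0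
        match [p, q].foldl (pvUnlink n) (st.prev, st.nxt, st.alive) with
        | (prev', nxt', alive') =>
          { prev := prev', nxt := nxt', alive := alive', live := st.live - 2,
            step := step', done := value == n }

def eliminate_neighbours_alt (items : List Int) : Int :=
  let n : Int := (items.length : Int)
  let pos := pvPositions items
  let st0 : PvBSt :=
    { prev := PySem.List.pyRange (-1) (n - 1) 1, nxt := PySem.List.pyRange 1 (n + 1) 1,
      alive := List.replicate items.length true, live := n, step := 0, done := false }
  ((PySem.List.pyRange 1 (n + 1) 1).foldl (pvBbody items n pos) st0).step

-- ===== PRECONDITION & SPEC =====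
def Spec_eliminate_neighbours (items : List Int) (out : Int) : Prop := out = eliminate_neighbours_alt items
instance (items : List Int) (out : Int) : Decidable (Spec_eliminate_neighbours items out) := by unfold Spec_eliminate_neighbours; infer_instance

-- ===== CLAIM (what is proved, stated in full; the proofs are below) =====
def Claim_equal_eliminate_neighbours : Prop := ∀ (items : List Int), Dom_eliminate_neighbours items → Spec_eliminate_neighbours items (eliminate_neighbours items)

-- ===== LEMMAS AND PROOFS =====

-- ========== A-side (reused, proven previously) ==========
def posStep (xs : List Int) (k : Nat) : Int × List Int :=
  if k = 0 ∨ (k + 1 < xs.length ∧ xs.getD (k+1) 0 > xs.getD (k-1) 0)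
  then (xs.getD (k+1) 0, (xs.eraseIdx k).eraseIdx k)
  else (xs.getD (k-1) 0, (xs.eraseIdx (k-1)).eraseIdx (k-1))

lemma erase2_eq_take_drop {α : Type} [Inhabited α] (xs : List α) : ∀ (k : Nat), k < xs.length →
    (xs.eraseIdx k).eraseIdx k = xs.take k ++ xs.drop (k+2) := by
  induction xs with
  | nil => intro k hk; simp at hk
  | cons x t ih =>
    intro k hk
    cases k with
    | zero => cases t <;> simp
    | succ k =>
      simp only [List.eraseIdx_cons_succ, List.take_succ_cons, List.drop_succ_cons,
        List.cons_append, List.cons.injEq, true_and]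
      exact ih k (by simpa using hk)

lemma pvAbody_done (n : Int) (l : List Int) (its : List Int) (s : Int) :
    l.foldl (pvAbody n) (its, s, true) = (its, s, true) := by
  induction l with
  | nil => rfl
  | cons a l ih => simpa [pvAbody] using ih

lemma pvAbody_notmem (n : Int) (its : List Int) (s : Int) (i : Int) (h : i ∉ its) :
    pvAbody n (its, s, false) i = (its, s, false) := by
  simp [pvAbody, h]

lemma pvAbody_spec (n : Int) (its : List Int) (step i : Int) (k : Nat)
    (hlen : 2 ≤ its.length) (h : PySem.List.index? its i = some k) :
    pvAbody n (its, step, false) i =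
      ((posStep its k).2, step + 1, if (posStep its k).1 = n then true else false) := by
  obtain ⟨hk, hik, -⟩ := PySem.List.getElem_of_index?_eq_some h
  have hmem : i ∈ its := hik ▸ List.getElem_mem hk
  simp only [pvAbody, Bool.false_eq_true, if_false, if_pos hmem,
    if_neg (show ¬ its.length = 1 by omega), h]
  have hget : ∀ m : Nat, (PySem.List.pyGet? its ((m:Nat):Int)).getD 0 = its.getD m 0 := by
    intro m; rw [PySem.List.pyGet?_natCast]; rw [List.getD_eq_getElem?_getD]
  have hc1 : ((k:Int) + 1) = (((k+1:Nat)):Int) := by push_cast; ring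
  by_cases hC : ((k:Int) - 1 < 0 ∨ (k:Int) + 1 < (its.length:Int) ∧
      (PySem.List.pyGet? its ((k:Int) + 1)).getD 0 > (PySem.List.pyGet? its ((k:Int) - 1)).getD 0)
  · have hklt : k < its.length - 1 := by
      rcases hC with h0 | ⟨hlt, -⟩ <;> omega
    have hcond : k = 0 ∨ (k + 1 < its.length ∧ its.getD (k+1) 0 > its.getD (k-1) 0) := by
      by_cases hk0 : k = 0
      · exact Or.inl hk0
      · have hm : ((k:Int) - 1) = (((k-1:Nat)):Int) := by omega
        rcases hC with h0 | ⟨hlt, hgt⟩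
        · exact absurd h0 (by omega)
        · rw [hc1, hm, hget, hget] at hgt
          exact Or.inr ⟨by omega, hgt⟩
    simp only [if_pos hC, if_neg (show ¬((k:Int) > (k:Int) + 1) by omega)]
    rw [PySem.List.pop?_natCast its k hk]
    dsimp only
    rw [PySem.List.pop?_natCast _ k (by rw [List.length_eraseIdx, if_pos hk]; omega)]
    dsimp only
    rw [hc1, hget]
    rw [posStep, if_pos hcond]
    split_ifs <;> rfl
  · have hk1 : 1 ≤ k := by by_contra hc; exact hC (Or.inl (by omega))
    have hm : ((k:Int) - 1) = (((k-1:Nat)):Int) := by omega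
    have hncond : ¬(k = 0 ∨ (k + 1 < its.length ∧ its.getD (k+1) 0 > its.getD (k-1) 0)) := by
      rintro (h0 | ⟨hlt, hgt⟩)
      · omega
      · exact hC (Or.inr ⟨by omega, by rw [hc1, hm, hget, hget]; exact hgt⟩)
    simp only [if_neg hC, if_pos (show (k:Int) > (k:Int) - 1 by omega)]
    rw [hm, PySem.List.pop?_natCast its (k-1) (by omega)]
    dsimp only
    rw [PySem.List.pop?_natCast _ (k-1) (by rw [List.length_eraseIdx, if_pos (show k-1 < its.length by omega)]; omega)]
    dsimp only
    rw [hget]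
    rw [posStep, if_neg hncond]
    split_ifs <;> rfl
-- ========== positions map characterization ==========
def pvOcc (items : List Int) (s : Int) (v : Int) : List Int :=
  ((PySem.List.enumerate items s).filter (fun p => p.2 == v)).map (·.1)

lemma pvPositions_getD (items : List Int) (v : Int) :
    (pvPositions items).getD v [] = pvOcc items 0 v := by
  unfold pvPositions pvOcc
  have hfold : (PySem.List.enumerate items 0).foldl
      (fun d p => d.modify p.2 [] (fun l => l ++ [p.1])) PySem.Dict.empty
      = ((PySem.List.enumerate items 0).map (fun p => (p.2, p.1))).foldl
          (fun d p => d.modify p.1 [] (fun l => l ++ [p.2])) PySem.Dict.empty := by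
    rw [List.foldl_map]
  rw [hfold, PySem.Dict.getD_foldl_modify_append, PySem.Dict.getD_empty, List.nil_append,
    List.filter_map, List.map_map]
  rfl

lemma mem_pvOcc (items : List Int) (v : Int) : ∀ (s x : Int),
    x ∈ pvOcc items s v ↔ ∃ m : Nat, m < items.length ∧ items.getD m 0 = v ∧ x = s + m := by
  induction items with
  | nil => intro s x; simp [pvOcc, PySem.List.enumerate_nil]
  | cons a t ih =>
    intro s x
    rw [pvOcc, PySem.List.enumerate_cons]
    by_cases ha : a = v
    · rw [List.filter_cons_of_pos (by simpa using ha)]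
      simp only [List.map_cons, List.mem_cons]
      constructor
      · rintro (rfl | hx)
        · exact ⟨0, by simpa using ha⟩
        · obtain ⟨m, hm, hv, rfl⟩ := (ih (s+1) x).mp hx
          exact ⟨m + 1, by simpa using hm, by simpa using hv, by push_cast; ring⟩
      · rintro ⟨m, hm, hv, rfl⟩
        cases m with
        | zero => left; simp
        | succ m =>
          right
          refine (ih (s+1) _).mpr ⟨m, by simpa using hm, by simpa using hv, by push_cast; ring⟩
    · rw [List.filter_cons_of_neg (by simpa using ha)]
      rw [show ((List.filter (fun p => p.2 == v) (PySem.List.enumerate t (s+1))).map (·.1)) = pvOcc t (s+1) v from rfl]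
      rw [ih (s+1)]
      constructor
      · rintro ⟨m, hm, hv, rfl⟩
        exact ⟨m + 1, by simpa using hm, by simpa using hv, by push_cast; ring⟩
      · rintro ⟨m, hm, hv, rfl⟩
        cases m with
        | zero => exact absurd (by simpa using hv) ha
        | succ m => exact ⟨m, by simpa using hm, by simpa using hv, by push_cast; ring⟩

lemma pairwise_pvOcc (items : List Int) (s v : Int) : (pvOcc items s v).Pairwise (· < ·) := by
  have hsub : (pvOcc items s v).Sublist ((PySem.List.enumerate items s).map (·.1)) :=
    List.Sublist.map _ List.filter_sublist
  refine List.Pairwise.sublist hsub ?_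
  rw [PySem.List.map_fst_enumerate]
  exact PySem.List.pairwise_lt_pyRange_one _ _

-- ========== first-alive scan ==========
lemma pvFirstAlive_none (ps : List Int) (alive : List Bool)
    (h : ∀ j ∈ ps, (PySem.List.pyGet? alive j).getD false = false) :
    pvFirstAlive ps alive = -1 := by
  induction ps with
  | nil => rfl
  | cons j t ih =>
    rw [pvFirstAlive, if_neg (by simp [h j (by simp)]), ih (fun j hj => h j (by simp [hj]))]

lemma pvFirstAlive_found (ps : List Int) (alive : List Bool) (p : Int)
    (hpair : ps.Pairwise (· < ·)) (hp : p ∈ ps)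
    (ha : (PySem.List.pyGet? alive p).getD false = true)
    (hmin : ∀ j ∈ ps, (PySem.List.pyGet? alive j).getD false = true → p ≤ j) :
    pvFirstAlive ps alive = p := by
  induction ps with
  | nil => simp at hp
  | cons j t ih =>
    rcases List.mem_cons.mp hp with rfl | hpt
    · rw [pvFirstAlive, if_pos (by simp [ha])]
    · by_cases hj : (PySem.List.pyGet? alive j).getD false = true
      · have h1 : p ≤ j := hmin j (by simp) hj
        have h2 : j < p := (List.pairwise_cons.mp hpair).1 p hpt
        omega
      · rw [pvFirstAlive, if_neg (by simpa using hj)]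
        exact ih (List.pairwise_cons.mp hpair).2 hpt
          (fun x hx h => hmin x (by simp [hx]) h)
-- ========== linked-list invariant ==========
def pvLinks (n : Nat) (prev nxt : List Int) (js : List Nat) : Prop :=
  ∀ m : Nat, m < js.length →
    (nxt.getD (js.getD m 0) 0 =
      if m + 1 < js.length then ((js.getD (m+1) 0 : Nat) : Int) else (n : Int)) ∧
    (prev.getD (js.getD m 0) 0 =
      if m = 0 then -1 else ((js.getD (m-1) 0 : Nat) : Int))

lemma js_getD_mem (js : List Nat) {m : Nat} (h : m < js.length) : js.getD m 0 ∈ js := by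
  rw [List.getD_eq_getElem?_getD, List.getElem?_eq_getElem h]
  exact List.getElem_mem h

lemma js_getD_lt (js : List Nat) (hpair : js.Pairwise (· < ·)) {m1 m2 : Nat}
    (h : m1 < m2) (h2 : m2 < js.length) : js.getD m1 0 < js.getD m2 0 := by
  rw [List.getD_eq_getElem?_getD, List.getElem?_eq_getElem (by omega),
    List.getD_eq_getElem?_getD, List.getElem?_eq_getElem h2]
  exact List.pairwise_iff_getElem.mp hpair m1 m2 (by omega) h2 h

lemma js_getD_ne (js : List Nat) (hpair : js.Pairwise (· < ·)) {m1 m2 : Nat}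
    (h : m1 ≠ m2) (h1 : m1 < js.length) (h2 : m2 < js.length) :
    js.getD m1 0 ≠ js.getD m2 0 := by
  rcases Nat.lt_or_ge m1 m2 with hlt | hge
  · exact Nat.ne_of_lt (js_getD_lt js hpair hlt h2)
  · exact (Nat.ne_of_lt (js_getD_lt js hpair (by omega) h1)).symm

lemma getD_eraseIdx (js : List Nat) (m t : Nat) (hm : m < js.length) (ht : t < js.length - 1) :
    (js.eraseIdx m).getD t 0 = if t < m then js.getD t 0 else js.getD (t+1) 0 := by
  have hlen : (js.eraseIdx m).length = js.length - 1 := by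
    rw [List.length_eraseIdx, if_pos hm]
  rw [List.getD_eq_getElem?_getD, List.getElem?_eq_getElem (by omega),
    List.getElem_eraseIdx (by omega)]
  split_ifs with h
  · rw [List.getD_eq_getElem?_getD, List.getElem?_eq_getElem (by omega)]
  · rw [List.getD_eq_getElem?_getD, List.getElem?_eq_getElem (by omega)]

lemma mem_eraseIdx_pairwise (js : List Nat) (hpair : js.Pairwise (· < ·)) (m : Nat)
    (hm : m < js.length) (x : Nat) :
    x ∈ js.eraseIdx m ↔ x ∈ js ∧ x ≠ js.getD m 0 := by
  have hnd : js.Nodup := hpair.nodup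
  have hgd : js.getD m 0 = js[m] := by
    rw [List.getD_eq_getElem?_getD, List.getElem?_eq_getElem hm]; rfl
  have hsplit : js = js.take m ++ js[m] :: js.drop (m+1) := by
    conv_lhs => rw [← List.take_append_drop m js]
    rw [List.getElem_cons_drop hm]
  rw [List.eraseIdx_eq_take_drop_succ, hgd]
  constructor
  · intro hx
    have hxj : x ∈ js := by
      rw [hsplit]
      rcases List.mem_append.mp hx with h | h
      · exact List.mem_append.mpr (Or.inl h)
      · exact List.mem_append.mpr (Or.inr (List.mem_cons_of_mem _ h))
    refine ⟨hxj, ?_⟩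
    intro hxe
    subst hxe
    have : ¬ (js[m] ∈ js.take m ++ js.drop (m+1)) := by
      have := hsplit ▸ hnd
      have hnd' := List.nodup_append.mp this
      intro hc
      rcases List.mem_append.mp hc with h | h
      · exact hnd'.2.2 js[m] h js[m] (List.mem_cons_self ..) rfl
      · exact (List.nodup_cons.mp hnd'.2.1).1 h
    exact this hx
  · rintro ⟨hxj, hne⟩
    rw [hsplit] at hxj
    rcases List.mem_append.mp hxj with h | h
    · exact List.mem_append.mpr (Or.inl h)
    · rcases List.mem_cons.mp h with rfl | h
      · exact absurd rfl hne
      · exact List.mem_append.mpr (Or.inr h)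

lemma getD_set_lt (l : List Int) (i : Nat) (v : Int) (j : Nat)
    (hj : j < l.length) :
    (l.set i v).getD j 0 = if i = j then v else l.getD j 0 := by
  rw [List.getD_eq_getElem?_getD, List.getElem?_set_of_lt v l hj,
    List.getD_eq_getElem?_getD]
  split_ifs <;> rfl

lemma getD_set_bool_lt (l : List Bool) (i : Nat) (v : Bool) (j : Nat)
    (hj : j < l.length) :
    (l.set i v).getD j false = if i = j then v else l.getD j false := by
  rw [List.getD_eq_getElem?_getD, List.getElem?_set_of_lt v l hj,
    List.getD_eq_getElem?_getD]
  split_ifs <;> rfl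
-- read helper: items/prev/nxt/alive are indexed with nonnegative in-range indices only
lemma pvRead (l : List Int) (j : Nat) :
    (PySem.List.pyGet? l ((j : Nat) : Int)).getD 0 = l.getD j 0 := by
  rw [PySem.List.pyGet?_natCast, List.getD_eq_getElem?_getD]

lemma pvReadB (l : List Bool) (j : Nat) :
    (PySem.List.pyGet? l ((j : Nat) : Int)).getD false = l.getD j false := by
  rw [PySem.List.pyGet?_natCast, List.getD_eq_getElem?_getD]

lemma pvUnlink_spec (items : List Int) (js : List Nat) (prev nxt : List Int)
    (alive : List Bool) (m : Nat)
    (hpair : js.Pairwise (· < ·)) (hbound : ∀ j ∈ js, j < items.length)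
    (hlp : prev.length = items.length) (hln : nxt.length = items.length)
    (hla : alive.length = items.length)
    (halive : ∀ j : Nat, j < items.length → alive.getD j false = decide (j ∈ js))
    (hlinks : pvLinks items.length prev nxt js) (hm : m < js.length) :
    ∃ P N AL,
      pvUnlink ((items.length : Nat) : Int) (prev, nxt, alive) ((js.getD m 0 : Nat) : Int)
        = (P, N, AL) ∧
      P.length = items.length ∧ N.length = items.length ∧ AL.length = items.length ∧
      (∀ j : Nat, j < items.length → AL.getD j false = decide (j ∈ js.eraseIdx m)) ∧
      pvLinks items.length P N (js.eraseIdx m) := by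
  have hxlt : js.getD m 0 < items.length := hbound _ (js_getD_mem js hm)
  have hlen' : (js.eraseIdx m).length = js.length - 1 := by
    rw [List.length_eraseIdx, if_pos hm]
  have ha := (hlinks m hm).2
  have hb := (hlinks m hm).1
  refine ⟨(if m + 1 < js.length then prev.set (js.getD (m+1) 0) (if m = 0 then -1 else ((js.getD (m-1) 0 : Nat):Int)) else prev),
    (if 0 < m then nxt.set (js.getD (m-1) 0) (if m + 1 < js.length then ((js.getD (m+1) 0 : Nat):Int) else ((items.length : Nat):Int)) else nxt),
    alive.set (js.getD m 0) false, ?_, ?_, ?_, ?_, ?_, ?_⟩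
  · -- the unlink computes exactly these three lists
    unfold pvUnlink
    by_cases hm0 : m = 0 <;> by_cases hm1 : m + 1 < js.length
    · have ha0 : prev.getD (js.getD m 0) 0 = -1 := by rw [ha, if_pos hm0]
      have hb0 : nxt.getD (js.getD m 0) 0 = ((js.getD (m+1) 0 : Nat) : Int) := by
        rw [hb, if_pos hm1]
      rw [if_pos hm1, if_pos hm0, if_neg (show ¬ 0 < m by omega)]
      simp only [pvRead, ha0, hb0]
      rw [if_neg (show ¬ ((-1 : Int) ≥ 0) by norm_num),
        if_pos (show ((js.getD (m+1) 0 : Nat) : Int) < ((items.length : Nat) : Int) by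
          have h := hbound _ (js_getD_mem js hm1); exact_mod_cast h)]
      simp only [PySem.List.pySetD_natCast]
    · have ha0 : prev.getD (js.getD m 0) 0 = -1 := by rw [ha, if_pos hm0]
      have hb0 : nxt.getD (js.getD m 0) 0 = ((items.length : Nat) : Int) := by
        rw [hb, if_neg hm1]
      rw [if_neg hm1, if_neg (show ¬ 0 < m by omega)]
      simp only [pvRead, ha0, hb0]
      rw [if_neg (show ¬ ((-1 : Int) ≥ 0) by norm_num),
        if_neg (show ¬ (((items.length : Nat) : Int) < ((items.length : Nat) : Int)) by omega)]
      simp only [PySem.List.pySetD_natCast]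
    · have ha0 : prev.getD (js.getD m 0) 0 = ((js.getD (m-1) 0 : Nat) : Int) := by
        rw [ha, if_neg hm0]
      have hb0 : nxt.getD (js.getD m 0) 0 = ((js.getD (m+1) 0 : Nat) : Int) := by
        rw [hb, if_pos hm1]
      rw [if_pos hm1, if_neg hm0, if_pos (show 0 < m by omega)]
      simp only [pvRead, ha0, hb0]
      rw [if_pos (show ((js.getD (m-1) 0 : Nat) : Int) ≥ 0 by positivity),
        if_pos (show ((js.getD (m+1) 0 : Nat) : Int) < ((items.length : Nat) : Int) by
          have h := hbound _ (js_getD_mem js hm1); exact_mod_cast h)]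
      simp only [PySem.List.pySetD_natCast]
      rw [if_pos hm1]
    · have ha0 : prev.getD (js.getD m 0) 0 = ((js.getD (m-1) 0 : Nat) : Int) := by
        rw [ha, if_neg hm0]
      have hb0 : nxt.getD (js.getD m 0) 0 = ((items.length : Nat) : Int) := by
        rw [hb, if_neg hm1]
      rw [if_neg hm1, if_pos (show 0 < m by omega)]
      simp only [pvRead, ha0, hb0]
      rw [if_pos (show ((js.getD (m-1) 0 : Nat) : Int) ≥ 0 by positivity),
        if_neg (show ¬ (((items.length : Nat) : Int) < ((items.length : Nat) : Int)) by omega)]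
      simp only [PySem.List.pySetD_natCast]
      rw [if_neg hm1]
  · split_ifs <;> simp [hlp]
  · split_ifs <;> simp [hln]
  · simp [hla]
  · intro j hj
    rw [getD_set_bool_lt alive (js.getD m 0) false j (by omega)]
    have hiff := mem_eraseIdx_pairwise js hpair m hm j
    by_cases hje : js.getD m 0 = j
    · rw [if_pos hje]
      have hnotin : ¬ (j ∈ js.eraseIdx m) := fun hc => ((hiff.mp hc).2 hje.symm)
      simp [hnotin]
    · rw [if_neg hje, halive j hj]
      have hsame : (j ∈ js) ↔ (j ∈ js.eraseIdx m) :=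
        ⟨fun h => hiff.mpr ⟨h, fun he => hje he.symm⟩, fun h => (hiff.mp h).1⟩
      exact decide_eq_decide.mpr hsame
  · -- links for js.eraseIdx m
    intro t ht
    rw [hlen'] at ht
    have hgt : ∀ u : Nat, u < js.length - 1 →
        (js.eraseIdx m).getD u 0 = if u < m then js.getD u 0 else js.getD (u+1) 0 :=
      fun u hu => getD_eraseIdx js m u hm (by omega)
    constructor
    · -- nxt half
      by_cases hset : 0 < m
      · rw [if_pos hset]
        by_cases hteq : t = m - 1
        · have hL : (js.eraseIdx m).getD t 0 = js.getD (m-1) 0 := by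
            rw [hgt t ht, if_pos (show t < m by omega), hteq]
          rw [hL, getD_set_lt nxt (js.getD (m-1) 0) _ (js.getD (m-1) 0)
              (by rw [hln]; exact hbound _ (js_getD_mem js (by omega))),
            if_pos rfl]
          by_cases hm1 : m + 1 < js.length
          · rw [if_pos hm1, if_pos (show t + 1 < (js.eraseIdx m).length by omega),
              hgt (t+1) (by omega), if_neg (show ¬ t + 1 < m by omega),
              show t + 1 + 1 = m + 1 by omega]
          · rw [if_neg hm1, if_neg (show ¬ t + 1 < (js.eraseIdx m).length by omega)]
        · have hL : (js.eraseIdx m).getD t 0 = if t < m then js.getD t 0 else js.getD (t+1) 0 :=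
            hgt t ht
          have hidx : (if t < m then js.getD t 0 else js.getD (t+1) 0) ≠ js.getD (m-1) 0 := by
            split_ifs with hcase
            · exact js_getD_ne js hpair (by omega) (by omega) (by omega)
            · exact js_getD_ne js hpair (by omega) (by omega) (by omega)
          rw [hL, getD_set_lt nxt (js.getD (m-1) 0) _ _
              (by rw [hln]; split_ifs <;> exact hbound _ (js_getD_mem js (by omega))),
            if_neg (fun hc => hidx hc.symm)]
          by_cases hcase : t < m
          · rw [if_pos hcase, (hlinks t (by omega)).1,
              if_pos (show t + 1 < js.length by omega),
              if_pos (show t + 1 < (js.eraseIdx m).length by omega),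
              hgt (t+1) (by omega), if_pos (show t + 1 < m by omega)]
          · rw [if_neg hcase, (hlinks (t+1) (by omega)).1]
            by_cases hend : t + 1 < js.length - 1
            · rw [if_pos (show t + 1 + 1 < js.length by omega),
                if_pos (show t + 1 < (js.eraseIdx m).length by omega),
                hgt (t+1) (by omega), if_neg (show ¬ t + 1 < m by omega)]
            · rw [if_neg (show ¬ t + 1 + 1 < js.length by omega),
                if_neg (show ¬ t + 1 < (js.eraseIdx m).length by omega)]
      · -- m = 0: nxt untouched, every surviving index shifts by one
        rw [if_neg hset]
        have hL : (js.eraseIdx m).getD t 0 = js.getD (t+1) 0 := by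
          rw [hgt t ht, if_neg (show ¬ t < m by omega)]
        rw [hL, (hlinks (t+1) (by omega)).1]
        by_cases hend : t + 1 < js.length - 1
        · rw [if_pos (show t + 1 + 1 < js.length by omega),
            if_pos (show t + 1 < (js.eraseIdx m).length by omega),
            hgt (t+1) (by omega), if_neg (show ¬ t + 1 < m by omega)]
        · rw [if_neg (show ¬ t + 1 + 1 < js.length by omega),
            if_neg (show ¬ t + 1 < (js.eraseIdx m).length by omega)]
    · -- prev half
      by_cases hset : m + 1 < js.length
      · rw [if_pos hset]
        by_cases hteq : t = m
        · have hL : (js.eraseIdx m).getD t 0 = js.getD (m+1) 0 := by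
            rw [hgt t ht, if_neg (show ¬ t < m by omega), hteq]
          rw [hL, getD_set_lt prev (js.getD (m+1) 0) _ (js.getD (m+1) 0)
              (by rw [hlp]; exact hbound _ (js_getD_mem js hset)),
            if_pos rfl]
          by_cases hm0 : m = 0
          · rw [if_pos hm0, if_pos (show t = 0 by omega)]
          · rw [if_neg hm0, if_neg (show ¬ t = 0 by omega),
              hgt (t-1) (by omega), if_pos (show t - 1 < m by omega),
              show t - 1 = m - 1 by omega]
        · have hL : (js.eraseIdx m).getD t 0 = if t < m then js.getD t 0 else js.getD (t+1) 0 :=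
            hgt t ht
          have hidx : (if t < m then js.getD t 0 else js.getD (t+1) 0) ≠ js.getD (m+1) 0 := by
            split_ifs with hcase
            · exact js_getD_ne js hpair (by omega) (by omega) (by omega)
            · exact js_getD_ne js hpair (by omega) (by omega) (by omega)
          rw [hL, getD_set_lt prev (js.getD (m+1) 0) _ _
              (by rw [hlp]; split_ifs <;> exact hbound _ (js_getD_mem js (by omega))),
            if_neg (fun hc => hidx hc.symm)]
          by_cases hcase : t < m
          · rw [if_pos hcase, (hlinks t (by omega)).2]
            by_cases ht0 : t = 0
            · rw [if_pos ht0, if_pos ht0]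
            · rw [if_neg ht0, if_neg ht0, hgt (t-1) (by omega),
                if_pos (show t - 1 < m by omega)]
          · -- here t > m
            rw [if_neg hcase, (hlinks (t+1) (by omega)).2,
              if_neg (show ¬ t + 1 = 0 by omega), if_neg (show ¬ t = 0 by omega),
              hgt (t-1) (by omega), if_neg (show ¬ t - 1 < m by omega),
              show t + 1 - 1 = t by omega, show t - 1 + 1 = t by omega]
      · -- m + 1 = js.length: prev untouched; then t < m always
        rw [if_neg hset]
        have hL : (js.eraseIdx m).getD t 0 = js.getD t 0 := by
          rw [hgt t ht, if_pos (show t < m by omega)]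
        rw [hL, (hlinks t (by omega)).2]
        by_cases ht0 : t = 0
        · rw [if_pos ht0, if_pos ht0]
        · rw [if_neg ht0, if_neg ht0, hgt (t-1) (by omega),
            if_pos (show t - 1 < m by omega)]
-- ========== simulation invariant ==========
def pvInv (items : List Int) (js : List Nat) (st : PvBSt) : Prop :=
  js.Pairwise (· < ·) ∧ (∀ j ∈ js, j < items.length) ∧
  st.prev.length = items.length ∧ st.nxt.length = items.length ∧
  st.alive.length = items.length ∧
  (∀ j : Nat, j < items.length → st.alive.getD j false = decide (j ∈ js)) ∧
  pvLinks items.length st.prev st.nxt js ∧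
  st.live = (js.length : Int)

lemma getD_map_f (items : List Int) (js : List Nat) (t : Nat) (ht : t < js.length) :
    (js.map (fun j => items.getD j 0)).getD t 0 = items.getD (js.getD t 0) 0 := by
  rw [List.getD_eq_getElem?_getD, List.getElem?_eq_getElem (by simpa using ht),
    List.getElem_map]
  simp only [Option.getD_some, List.getD_eq_getElem?_getD, List.getElem?_eq_getElem ht]

lemma pvBbody_done_foldl (items : List Int) (n : Int) (pos : PySem.Dict Int (List Int))
    (l : List Int) (st : PvBSt) (h : st.done = true) :
    l.foldl (pvBbody items n pos) st = st := by
  induction l with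
  | nil => rfl
  | cons a l ih => rw [List.foldl_cons, pvBbody, if_pos h, ih]

lemma pvFirstAlive_of_notmem (items : List Int) (js : List Nat) (st : PvBSt) (i : Int)
    (hInv : pvInv items js st) (hni : i ∉ js.map (fun j => items.getD j 0)) :
    pvFirstAlive ((pvPositions items).getD i []) st.alive = -1 := by
  obtain ⟨hpair, hbound, hlp, hln, hla, halive, hlinks, hlive⟩ := hInv
  rw [pvPositions_getD]
  refine pvFirstAlive_none _ _ ?_
  intro j hj
  obtain ⟨m, hm, hv, rfl⟩ := (mem_pvOcc items i 0 j).mp hj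
  rw [show (0 : Int) + (m : Int) = ((m : Nat) : Int) by omega, pvReadB, halive m hm]
  by_contra hc
  have hmem : m ∈ js := by
    by_cases h : m ∈ js
    · exact h
    · simp [h] at hc
  exact hni (hv ▸ List.mem_map_of_mem hmem)

lemma pvFirstAlive_of_index (items : List Int) (js : List Nat) (st : PvBSt) (i : Int) (k : Nat)
    (hInv : pvInv items js st)
    (hk : PySem.List.index? (js.map (fun j => items.getD j 0)) i = some k) :
    pvFirstAlive ((pvPositions items).getD i []) st.alive = ((js.getD k 0 : Nat) : Int) := by
  obtain ⟨hpair, hbound, hlp, hln, hla, halive, hlinks, hlive⟩ := hInv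
  obtain ⟨hklt, hxk, hmin⟩ := PySem.List.getElem_of_index?_eq_some hk
  have hklen : k < js.length := by simpa using hklt
  have hxsk : items.getD (js.getD k 0) 0 = i := by
    rw [← getD_map_f items js k hklen, List.getD_eq_getElem?_getD,
      List.getElem?_eq_getElem hklt, hxk]
    rfl
  rw [pvPositions_getD]
  refine pvFirstAlive_found _ _ _ (pairwise_pvOcc items 0 i) ?_ ?_ ?_
  · exact (mem_pvOcc items i 0 _).mpr
      ⟨js.getD k 0, hbound _ (js_getD_mem js hklen), hxsk, by omega⟩
  · rw [pvReadB, halive _ (hbound _ (js_getD_mem js hklen))]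
    exact decide_eq_true (js_getD_mem js hklen)
  · intro j hj halj
    obtain ⟨m, hm, hv, rfl⟩ := (mem_pvOcc items i 0 j).mp hj
    rw [show (0 : Int) + (m : Int) = ((m : Nat) : Int) by omega, pvReadB, halive m hm] at halj
    have hmem : m ∈ js := by
      by_cases h : m ∈ js
      · exact h
      · simp [h] at halj
    obtain ⟨t, htlt, hts⟩ := List.mem_iff_getElem.mp hmem
    have htD : js.getD t 0 = m := by
      rw [List.getD_eq_getElem?_getD, List.getElem?_eq_getElem htlt, hts]; rfl
    have hxst : (js.map (fun j => items.getD j 0))[t]'(by simpa using htlt) = i := by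
      rw [List.getElem_map, hts, hv]
    have hkt : k ≤ t := by
      by_contra hc
      exact hmin t (by omega) hxst
    have : js.getD k 0 ≤ m := by
      rcases Nat.eq_or_lt_of_le hkt with rfl | hlt
      · omega
      · have := js_getD_lt js hpair hlt htlt
        omega
    omega
lemma erase2_left {α : Type} (xs : List α) : ∀ k : Nat, 1 ≤ k → k < xs.length →
    (xs.eraseIdx k).eraseIdx (k-1) = xs.take (k-1) ++ xs.drop (k+1) := by
  induction xs with
  | nil => intro k h1 h2; simp at h2
  | cons x t ih =>
    intro k h1 h2
    obtain ⟨k', rfl⟩ : ∃ k', k = k' + 1 := ⟨k - 1, by omega⟩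
    simp only [List.eraseIdx_cons_succ, Nat.add_sub_cancel]
    cases k' with
    | zero =>
      cases t with
      | nil => simp at h2
      | cons y u => simp [List.eraseIdx]
    | succ k'' =>
      have hih := ih (k''+1) (by omega) (by simpa using h2)
      simp only [Nat.add_sub_cancel] at hih
      simp only [List.eraseIdx_cons_succ, hih, List.take_succ_cons, List.drop_succ_cons,
        List.cons_append]
-- removing element k and then its right neighbour (element k of the remainder)
lemma pvRemoveRight (items : List Int) (js : List Nat) (prev nxt : List Int) (alive : List Bool)
    (k : Nat) (hpair : js.Pairwise (· < ·)) (hbound : ∀ j ∈ js, j < items.length)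
    (hlp : prev.length = items.length) (hln : nxt.length = items.length)
    (hla : alive.length = items.length)
    (halive : ∀ j : Nat, j < items.length → alive.getD j false = decide (j ∈ js))
    (hlinks : pvLinks items.length prev nxt js) (hk1 : k + 1 < js.length) :
    ∃ P N AL,
      [((js.getD k 0 : Nat) : Int), ((js.getD (k+1) 0 : Nat) : Int)].foldl
          (pvUnlink ((items.length : Nat) : Int)) (prev, nxt, alive) = (P, N, AL) ∧
      P.length = items.length ∧ N.length = items.length ∧ AL.length = items.length ∧
      (∀ j : Nat, j < items.length →
        AL.getD j false = decide (j ∈ (js.eraseIdx k).eraseIdx k)) ∧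
      pvLinks items.length P N ((js.eraseIdx k).eraseIdx k) := by
  obtain ⟨P1, N1, AL1, e1, l1, l2, l3, al1, links1⟩ :=
    pvUnlink_spec items js prev nxt alive k hpair hbound hlp hln hla halive hlinks (by omega)
  have hpair1 : (js.eraseIdx k).Pairwise (· < ·) := hpair.sublist (List.eraseIdx_sublist ..)
  have hbound1 : ∀ j ∈ js.eraseIdx k, j < items.length :=
    fun j hj => hbound j ((List.eraseIdx_sublist ..).mem hj)
  have hlen1 : (js.eraseIdx k).length = js.length - 1 := by
    rw [List.length_eraseIdx, if_pos (by omega)]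
  have hq : js.getD (k+1) 0 = (js.eraseIdx k).getD k 0 := by
    rw [getD_eraseIdx js k k (by omega) (by omega), if_neg (lt_irrefl k)]
  obtain ⟨P2, N2, AL2, e2, m1, m2, m3, al2, links2⟩ :=
    pvUnlink_spec items (js.eraseIdx k) P1 N1 AL1 k hpair1 hbound1 l1 l2 l3 al1 links1
      (by omega)
  refine ⟨P2, N2, AL2, ?_, m1, m2, m3, al2, links2⟩
  rw [List.foldl_cons, List.foldl_cons, List.foldl_nil, e1, hq, e2]

-- removing element k and then its left neighbour (element k-1 of the remainder)
lemma pvRemoveLeft (items : List Int) (js : List Nat) (prev nxt : List Int) (alive : List Bool)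
    (k : Nat) (hpair : js.Pairwise (· < ·)) (hbound : ∀ j ∈ js, j < items.length)
    (hlp : prev.length = items.length) (hln : nxt.length = items.length)
    (hla : alive.length = items.length)
    (halive : ∀ j : Nat, j < items.length → alive.getD j false = decide (j ∈ js))
    (hlinks : pvLinks items.length prev nxt js) (hk0 : 1 ≤ k) (hk : k < js.length) :
    ∃ P N AL,
      [((js.getD k 0 : Nat) : Int), ((js.getD (k-1) 0 : Nat) : Int)].foldl
          (pvUnlink ((items.length : Nat) : Int)) (prev, nxt, alive) = (P, N, AL) ∧
      P.length = items.length ∧ N.length = items.length ∧ AL.length = items.length ∧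
      (∀ j : Nat, j < items.length →
        AL.getD j false = decide (j ∈ (js.eraseIdx k).eraseIdx (k-1))) ∧
      pvLinks items.length P N ((js.eraseIdx k).eraseIdx (k-1)) := by
  obtain ⟨P1, N1, AL1, e1, l1, l2, l3, al1, links1⟩ :=
    pvUnlink_spec items js prev nxt alive k hpair hbound hlp hln hla halive hlinks hk
  have hpair1 : (js.eraseIdx k).Pairwise (· < ·) := hpair.sublist (List.eraseIdx_sublist ..)
  have hbound1 : ∀ j ∈ js.eraseIdx k, j < items.length :=
    fun j hj => hbound j ((List.eraseIdx_sublist ..).mem hj)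
  have hlen1 : (js.eraseIdx k).length = js.length - 1 := by
    rw [List.length_eraseIdx, if_pos hk]
  have hq : js.getD (k-1) 0 = (js.eraseIdx k).getD (k-1) 0 := by
    rw [getD_eraseIdx js k (k-1) hk (by omega), if_pos (by omega)]
  obtain ⟨P2, N2, AL2, e2, m1, m2, m3, al2, links2⟩ :=
    pvUnlink_spec items (js.eraseIdx k) P1 N1 AL1 (k-1) hpair1 hbound1 l1 l2 l3 al1 links1
      (by omega)
  refine ⟨P2, N2, AL2, ?_, m1, m2, m3, al2, links2⟩
  rw [List.foldl_cons, List.foldl_cons, List.foldl_nil, e1, hq, e2]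
lemma pvBbody_spec (items : List Int) (js : List Nat) (st : PvBSt) (i : Int) (k : Nat)
    (hInv : pvInv items js st) (hdone : st.done = false)
    (hlen2 : 2 ≤ js.length)
    (hk : PySem.List.index? (js.map (fun j => items.getD j 0)) i = some k) :
    ∃ js' st', pvBbody items ((items.length : Nat) : Int) (pvPositions items) st i = st' ∧
      pvInv items js' st' ∧
      js'.map (fun j => items.getD j 0) = (posStep (js.map (fun j => items.getD j 0)) k).2 ∧
      st'.step = st.step + 1 ∧
      st'.done = ((posStep (js.map (fun j => items.getD j 0)) k).1 == ((items.length : Nat) : Int)) := by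
  have hp := pvFirstAlive_of_index items js st i k hInv hk
  obtain ⟨hpair, hbound, hlp, hln, hla, halive, hlinks, hlive⟩ := hInv
  obtain ⟨hklt, hxk, hmin⟩ := PySem.List.getElem_of_index?_eq_some hk
  have hklen : k < js.length := by simpa using hklt
  have hxlen : (js.map (fun j => items.getD j 0)).length = js.length := List.length_map ..
  unfold pvBbody
  rw [hp]
  simp only [hdone, Bool.false_eq_true, if_false]
  rw [if_neg (show ¬ ((js.getD k 0 : Nat) : Int) < 0 by omega),
    if_neg (show ¬ st.live = 1 by rw [hlive]; omega)]
  by_cases hk0 : k = 0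
  · -- k = 0 : remove k and its right neighbour
    subst hk0
    have hl0 : (PySem.List.pyGet? st.prev ((js.getD 0 0 : Nat) : Int)).getD 0 = -1 := by
      rw [pvRead]; simpa using (hlinks 0 hklen).2
    have hr0 : (PySem.List.pyGet? st.nxt ((js.getD 0 0 : Nat) : Int)).getD 0
        = ((js.getD (0+1) 0 : Nat) : Int) := by
      rw [pvRead]
      have := (hlinks 0 hklen).1
      rwa [if_pos (show 0 + 1 < js.length by omega)] at this
    rw [hl0, hr0, if_pos (Or.inl (show (-1 : Int) < 0 by norm_num))]
    have hv : (PySem.List.pyGet? items ((js.getD (0+1) 0 : Nat) : Int)).getD 0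
        = (js.map (fun j => items.getD j 0)).getD (0+1) 0 := by
      rw [pvRead, getD_map_f items js (0+1) (by omega)]
    rw [hv]
    obtain ⟨P, N, AL, e, m1, m2, m3, al, links⟩ :=
      pvRemoveRight items js st.prev st.nxt st.alive 0 hpair hbound hlp hln hla halive hlinks
        (by omega)
    rw [e]
    have hpair'' : ((js.eraseIdx 0).eraseIdx 0).Pairwise (· < ·) :=
      (hpair.sublist (List.eraseIdx_sublist ..)).sublist (List.eraseIdx_sublist ..)
    have hbound'' : ∀ j ∈ (js.eraseIdx 0).eraseIdx 0, j < items.length :=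
      fun j hj => hbound j ((List.eraseIdx_sublist ..).mem ((List.eraseIdx_sublist ..).mem hj))
    have hlen'' : ((js.eraseIdx 0).eraseIdx 0).length = js.length - 2 := by
      rw [List.length_eraseIdx, List.length_eraseIdx, if_pos hklen, if_pos (by omega)]
      omega
    refine ⟨(js.eraseIdx 0).eraseIdx 0, _, rfl,
      ⟨hpair'', hbound'', m1, m2, m3, al, links, ?_⟩, ?_, rfl, ?_⟩
    · show st.live - 2 = _
      rw [hlive, hlen'']; push_cast; omega
    · rw [posStep, if_pos (Or.inl rfl)]
      simp only [List.eraseIdx_map]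
    · rw [posStep, if_pos (Or.inl rfl)]
  · by_cases hc2 : k + 1 < js.length
    · -- interior k: compare the two neighbours
      have hlv : (PySem.List.pyGet? st.prev ((js.getD k 0 : Nat) : Int)).getD 0
          = ((js.getD (k-1) 0 : Nat) : Int) := by
        rw [pvRead]
        have := (hlinks k hklen).2
        rwa [if_neg hk0] at this
      have hrv : (PySem.List.pyGet? st.nxt ((js.getD k 0 : Nat) : Int)).getD 0
          = ((js.getD (k+1) 0 : Nat) : Int) := by
        rw [pvRead]
        have := (hlinks k hklen).1
        rwa [if_pos hc2] at this
      have hR : (PySem.List.pyGet? items ((js.getD (k+1) 0 : Nat) : Int)).getD 0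
          = (js.map (fun j => items.getD j 0)).getD (k+1) 0 := by
        rw [pvRead, getD_map_f items js (k+1) (by omega)]
      have hL : (PySem.List.pyGet? items ((js.getD (k-1) 0 : Nat) : Int)).getD 0
          = (js.map (fun j => items.getD j 0)).getD (k-1) 0 := by
        rw [pvRead, getD_map_f items js (k-1) (by omega)]
      rw [hlv, hrv, hR, hL]
      by_cases hgt : (js.map (fun j => items.getD j 0)).getD (k+1) 0
          > (js.map (fun j => items.getD j 0)).getD (k-1) 0
      · rw [if_pos (Or.inr ⟨by exact_mod_cast hbound _ (js_getD_mem js hc2), hgt⟩)]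
        obtain ⟨P, N, AL, e, m1, m2, m3, al, links⟩ :=
          pvRemoveRight items js st.prev st.nxt st.alive k hpair hbound hlp hln hla halive
            hlinks hc2
        rw [e]
        have hpair'' : ((js.eraseIdx k).eraseIdx k).Pairwise (· < ·) :=
          (hpair.sublist (List.eraseIdx_sublist ..)).sublist (List.eraseIdx_sublist ..)
        have hbound'' : ∀ j ∈ (js.eraseIdx k).eraseIdx k, j < items.length :=
          fun j hj => hbound j ((List.eraseIdx_sublist ..).mem ((List.eraseIdx_sublist ..).mem hj))
        have hlen'' : ((js.eraseIdx k).eraseIdx k).length = js.length - 2 := by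
          rw [List.length_eraseIdx, List.length_eraseIdx, if_pos hklen, if_pos (by omega)]
          omega
        refine ⟨(js.eraseIdx k).eraseIdx k, _, rfl,
          ⟨hpair'', hbound'', m1, m2, m3, al, links, ?_⟩, ?_, rfl, ?_⟩
        · show st.live - 2 = _
          rw [hlive, hlen'']; push_cast; omega
        · rw [posStep, if_pos (Or.inr ⟨by omega, hgt⟩)]
          simp only [List.eraseIdx_map]
        · rw [posStep, if_pos (Or.inr ⟨by omega, hgt⟩)]
          dsimp only
          rw [hR]
      · rw [if_neg (by
          push_neg
          refine ⟨by omega, fun _ => by omega⟩)]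
        obtain ⟨P, N, AL, e, m1, m2, m3, al, links⟩ :=
          pvRemoveLeft items js st.prev st.nxt st.alive k hpair hbound hlp hln hla halive
            hlinks (by omega) hklen
        rw [e]
        have hpair'' : ((js.eraseIdx k).eraseIdx (k-1)).Pairwise (· < ·) :=
          (hpair.sublist (List.eraseIdx_sublist ..)).sublist (List.eraseIdx_sublist ..)
        have hbound'' : ∀ j ∈ (js.eraseIdx k).eraseIdx (k-1), j < items.length :=
          fun j hj => hbound j ((List.eraseIdx_sublist ..).mem ((List.eraseIdx_sublist ..).mem hj))
        have hlen'' : ((js.eraseIdx k).eraseIdx (k-1)).length = js.length - 2 := by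
          rw [List.length_eraseIdx, List.length_eraseIdx, if_pos hklen, if_pos (by omega)]
          omega
        have hshape : (js.eraseIdx k).eraseIdx (k-1) = (js.eraseIdx (k-1)).eraseIdx (k-1) := by
          rw [erase2_left js k (by omega) hklen,
            erase2_eq_take_drop js (k-1) (by omega), show k - 1 + 2 = k + 1 by omega]
        refine ⟨(js.eraseIdx k).eraseIdx (k-1), _, rfl,
          ⟨hpair'', hbound'', m1, m2, m3, al, links, ?_⟩, ?_, rfl, ?_⟩
        · show st.live - 2 = _
          rw [hlive, hlen'']; push_cast; omega
        · rw [posStep, if_neg (by push_neg; exact ⟨hk0, fun _ => by omega⟩), hshape]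
          simp only [List.eraseIdx_map]
        · rw [posStep, if_neg (by push_neg; exact ⟨hk0, fun _ => by omega⟩)]
          dsimp only
          rw [hL]
    · -- k is the last live element: remove k and its left neighbour
      have hlv : (PySem.List.pyGet? st.prev ((js.getD k 0 : Nat) : Int)).getD 0
          = ((js.getD (k-1) 0 : Nat) : Int) := by
        rw [pvRead]
        have := (hlinks k hklen).2
        rwa [if_neg hk0] at this
      have hrv : (PySem.List.pyGet? st.nxt ((js.getD k 0 : Nat) : Int)).getD 0
          = ((items.length : Nat) : Int) := by
        rw [pvRead]
        have := (hlinks k hklen).1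
        rwa [if_neg hc2] at this
      have hL : (PySem.List.pyGet? items ((js.getD (k-1) 0 : Nat) : Int)).getD 0
          = (js.map (fun j => items.getD j 0)).getD (k-1) 0 := by
        rw [pvRead, getD_map_f items js (k-1) (by omega)]
      rw [hlv, hrv, hL,
        if_neg (by push_neg; exact ⟨by omega, fun hc => absurd hc (by omega)⟩)]
      obtain ⟨P, N, AL, e, m1, m2, m3, al, links⟩ :=
        pvRemoveLeft items js st.prev st.nxt st.alive k hpair hbound hlp hln hla halive
          hlinks (by omega) hklen
      rw [e]
      have hpair'' : ((js.eraseIdx k).eraseIdx (k-1)).Pairwise (· < ·) :=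
        (hpair.sublist (List.eraseIdx_sublist ..)).sublist (List.eraseIdx_sublist ..)
      have hbound'' : ∀ j ∈ (js.eraseIdx k).eraseIdx (k-1), j < items.length :=
        fun j hj => hbound j ((List.eraseIdx_sublist ..).mem ((List.eraseIdx_sublist ..).mem hj))
      have hlen'' : ((js.eraseIdx k).eraseIdx (k-1)).length = js.length - 2 := by
        rw [List.length_eraseIdx, List.length_eraseIdx, if_pos hklen, if_pos (by omega)]
        omega
      have hshape : (js.eraseIdx k).eraseIdx (k-1) = (js.eraseIdx (k-1)).eraseIdx (k-1) := by
        rw [erase2_left js k (by omega) hklen,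
          erase2_eq_take_drop js (k-1) (by omega), show k - 1 + 2 = k + 1 by omega]
      refine ⟨(js.eraseIdx k).eraseIdx (k-1), _, rfl,
        ⟨hpair'', hbound'', m1, m2, m3, al, links, ?_⟩, ?_, rfl, ?_⟩
      · show st.live - 2 = _
        rw [hlive, hlen'']; push_cast; omega
      · rw [posStep, if_neg (by push_neg; exact ⟨hk0, fun hc => absurd hc (by omega)⟩), hshape]
        simp only [List.eraseIdx_map]
      · rw [posStep, if_neg (by push_neg; exact ⟨hk0, fun hc => absurd hc (by omega)⟩)]
        dsimp only
        rw [hL]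
lemma pvBbody_notmem (items : List Int) (js : List Nat) (st : PvBSt) (i : Int)
    (hInv : pvInv items js st) (hdone : st.done = false)
    (hni : i ∉ js.map (fun j => items.getD j 0)) :
    pvBbody items ((items.length : Nat) : Int) (pvPositions items) st i = st := by
  unfold pvBbody
  rw [pvFirstAlive_of_notmem items js st i hInv hni]
  simp only [hdone, Bool.false_eq_true, if_false]
  rw [if_pos (by norm_num)]

lemma pvLoop_sim (items : List Int) : ∀ (fuel : Nat) (i : Int) (js : List Nat) (st : PvBSt),
    pvInv items js st → st.done = false →
    (((items.length : Int) + 1 - i).toNat = fuel) →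
    ((PySem.List.pyRange i ((items.length : Int) + 1) 1).foldl (pvAbody (items.length : Int))
        (js.map (fun j => items.getD j 0), st.step, false)).2.1
      = ((PySem.List.pyRange i ((items.length : Int) + 1) 1).foldl
          (pvBbody items ((items.length : Nat) : Int) (pvPositions items)) st).step := by
  intro fuel
  induction fuel with
  | zero =>
    intro i js st hInv hdone hf
    rw [PySem.List.pyRange_one_eq_nil (by omega), List.foldl_nil, List.foldl_nil]
  | succ f ih =>
    intro i js st hInv hdone hf
    have hi : i < (items.length : Int) + 1 := by omega
    rw [PySem.List.pyRange_one_cons (by omega), List.foldl_cons, List.foldl_cons]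
    by_cases hmem : i ∈ js.map (fun j => items.getD j 0)
    · have hks : (PySem.List.index? (js.map (fun j => items.getD j 0)) i).isSome :=
        (PySem.List.index?_isSome_iff _ i).mpr hmem
      obtain ⟨k, hk⟩ := Option.isSome_iff_exists.mp hks
      by_cases hlen1 : js.length = 1
      · -- last surviving element: both sides count one more step and stop
        have hxs1 : (js.map (fun j => items.getD j 0)).length = 1 := by
          rw [List.length_map]; exact hlen1
        obtain ⟨x, hxeq⟩ : ∃ x, js.map (fun j => items.getD j 0) = [x] :=
          List.length_eq_one_iff.mp hxs1
        have hxi : x = i := by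
          rw [hxeq] at hmem; exact (by simpa using hmem : i = x).symm
        have hA : pvAbody (items.length : Int)
            (js.map (fun j => items.getD j 0), st.step, false) i
            = ([], st.step + 1, true) := by
          rw [hxeq, hxi]
          simp [pvAbody, PySem.List.pop?_zero_cons]
        have hp := pvFirstAlive_of_index items js st i k hInv hk
        obtain ⟨hpair, hbound, hlp, hln, hla, halive, hlinks, hlive⟩ := hInv
        have hB : pvBbody items ((items.length : Nat) : Int) (pvPositions items) st i
            = { st with step := st.step + 1, done := true } := by
          unfold pvBbody
          rw [hp]
          simp only [hdone, Bool.false_eq_true, if_false]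
          rw [if_neg (show ¬ ((js.getD k 0 : Nat) : Int) < 0 by omega),
            if_pos (show st.live = 1 by rw [hlive, hlen1]; rfl)]
        rw [hA, hB, pvAbody_done, pvBbody_done_foldl items _ _ _ _ rfl]
      · -- a genuine elimination round
        have hlen2 : 2 ≤ js.length := by
          have hne : js ≠ [] := by
            rintro rfl; simp at hmem
          have := List.length_pos_of_ne_nil hne
          omega
        have hxlen2 : 2 ≤ (js.map (fun j => items.getD j 0)).length := by
          rw [List.length_map]; exact hlen2
        obtain ⟨js', st', e, hInv', hmap, hstep, hdone'⟩ :=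
          pvBbody_spec items js st i k hInv hdone hlen2 hk
        rw [pvAbody_spec (items.length : Int) _ st.step i k hxlen2 hk, e]
        by_cases hv : (posStep (js.map (fun j => items.getD j 0)) k).1 = (items.length : Int)
        · rw [if_pos hv, pvAbody_done,
            pvBbody_done_foldl items _ _ _ st' (by rw [hdone']; exact beq_iff_eq.mpr hv),
            hstep]
        · have hd' : st'.done = false := by
            rw [hdone']
            exact beq_eq_false_iff_ne.mpr hv
          rw [if_neg hv, ← hmap, ← hstep]
          exact ih (i+1) js' st' hInv' hd' (by omega)
    · rw [pvAbody_notmem _ _ _ i hmem, pvBbody_notmem items js st i hInv hdone hmem]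
      exact ih (i+1) js st hInv hdone (by omega)
lemma pvMapRange (items : List Int) :
    (List.range items.length).map (fun i => items.getD i 0) = items := by
  apply List.ext_getElem
  · simp
  · intro i h1 h2
    simp [List.getD_eq_getElem?_getD, List.getElem?_eq_getElem h2]

lemma pvInv_init (items : List Int) :
    pvInv items (List.range items.length)
      { prev := PySem.List.pyRange (-1) ((items.length : Int) - 1) 1,
        nxt := PySem.List.pyRange 1 ((items.length : Int) + 1) 1,
        alive := List.replicate items.length true,
        live := (items.length : Int), step := 0, done := false } := by
  have hrg : ∀ t : Nat, t < items.length →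
      (List.range items.length).getD t 0 = t := by
    intro t ht
    rw [List.getD_eq_getElem?_getD, List.getElem?_eq_getElem (by simpa using ht),
      List.getElem_range]
    rfl
  refine ⟨List.pairwise_lt_range, fun j hj => List.mem_range.mp hj, ?_, ?_, ?_, ?_, ?_, ?_⟩
  · show (PySem.List.pyRange (-1) ((items.length : Int) - 1) 1).length = _
    rw [PySem.List.length_pyRange_one]; omega
  · show (PySem.List.pyRange 1 ((items.length : Int) + 1) 1).length = _
    rw [PySem.List.length_pyRange_one]; omega
  · exact List.length_replicate
  · intro j hj
    simp [List.getD_eq_getElem?_getD, hj, List.mem_range]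
  · intro m hm
    have hm' : m < items.length := by simpa using hm
    constructor
    · show (PySem.List.pyRange 1 ((items.length : Int) + 1) 1).getD _ 0 = _
      rw [hrg m hm']
      have hv : (PySem.List.pyRange 1 ((items.length : Int) + 1) 1).getD m 0 = 1 + m := by
        rw [List.getD_eq_getElem?_getD,
          List.getElem?_eq_getElem (by rw [PySem.List.length_pyRange_one]; omega),
          PySem.List.getElem_pyRange_one]
        rfl
      rw [hv]
      split_ifs with h
      · rw [hrg (m+1) (by simpa using h)]; push_cast; ring
      · have : m + 1 = items.length := by
          simp only [List.length_range] at h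
          omega
        push_cast
        omega
    · show (PySem.List.pyRange (-1) ((items.length : Int) - 1) 1).getD _ 0 = _
      rw [hrg m hm']
      have hv : (PySem.List.pyRange (-1) ((items.length : Int) - 1) 1).getD m 0 = -1 + m := by
        rw [List.getD_eq_getElem?_getD,
          List.getElem?_eq_getElem (by rw [PySem.List.length_pyRange_one]; omega),
          PySem.List.getElem_pyRange_one]
        rfl
      rw [hv]
      split_ifs with h
      · subst h; simp
      · rw [hrg (m-1) (by omega)]
        push_cast
        omega
  · show (items.length : Int) = _
    simp

theorem pvMain (items : List Int) :
    eliminate_neighbours items = eliminate_neighbours_alt items := by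
  unfold eliminate_neighbours eliminate_neighbours_alt
  have h0 := pvLoop_sim items (((items.length : Int) + 1 - 1).toNat) 1
    (List.range items.length)
    { prev := PySem.List.pyRange (-1) ((items.length : Int) - 1) 1,
      nxt := PySem.List.pyRange 1 ((items.length : Int) + 1) 1,
      alive := List.replicate items.length true,
      live := (items.length : Int), step := 0, done := false }
    (pvInv_init items) rfl rfl
  show ((PySem.List.pyRange 1 ((items.length : Int) + 1) 1).foldl
      (pvAbody (items.length : Int)) (items, 0, false)).2.1 = _
  conv_lhs => rw [show ((items, (0 : Int), false) : List Int × Int × Bool)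
    = ((List.range items.length).map (fun j => items.getD j 0), (0 : Int), false) by
      rw [pvMapRange]]
  exact h0

-- ===== VERDICT (by name: the statement is the Claim_ definition above) =====
theorem eliminate_neighbours_spec : Claim_equal_eliminate_neighbours := by
  intro items _
  unfold Spec_eliminate_neighbours
  exact pvMain items
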